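-- pv_equiv track=rewrite | github.com/penndu/openakita | plugins/ppt-maker/ppt_activity_log.py | collect_iso_window
-- ===== SOURCE A (Python) =====
-- from collections.abc import Iterable
-- from typing import Any
--
-- def collect_iso_window(events: Iterable[dict[str, Any]]) -> tuple[str | None, str | None]:
--     """Return the first/last iso timestamps in the iterable, or ``(None, None)``."""
--     first: str | None = None
--     last: str | None = None
--     for event in events:
--         iso = event.get("iso")
--         if not iso:
--             continue
--         first = first or iso
--         last = iso
--     return first, last
-- ===== SOURCE B (Python) =====
-- from collections.abc import Iterable
-- from typing import Any
--
-- def collect_iso_window(events: Iterable[dict[str, Any]]) -> tuple[str | None, str | None]: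
--     """Return the first/last iso timestamps in the iterable, or ``(None, None)``."""
--     evs = list(events)
--     first = next((e.get("iso") for e in evs if e.get("iso")), None)
--     last = next((e.get("iso") for e in reversed(evs) if e.get("iso")), None)
--     return first, last
-- ===== Notes on version B (the rewrite author's own statement) =====
-- stated objective: alternative
-- what changed: B replaces A's single full pass maintaining two running scalars by two independent early-exit searches: a forward scan that stops at the first truthy iso and a backward scan over the reversed list that stops at the last truthy iso.
import Mathlib
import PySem

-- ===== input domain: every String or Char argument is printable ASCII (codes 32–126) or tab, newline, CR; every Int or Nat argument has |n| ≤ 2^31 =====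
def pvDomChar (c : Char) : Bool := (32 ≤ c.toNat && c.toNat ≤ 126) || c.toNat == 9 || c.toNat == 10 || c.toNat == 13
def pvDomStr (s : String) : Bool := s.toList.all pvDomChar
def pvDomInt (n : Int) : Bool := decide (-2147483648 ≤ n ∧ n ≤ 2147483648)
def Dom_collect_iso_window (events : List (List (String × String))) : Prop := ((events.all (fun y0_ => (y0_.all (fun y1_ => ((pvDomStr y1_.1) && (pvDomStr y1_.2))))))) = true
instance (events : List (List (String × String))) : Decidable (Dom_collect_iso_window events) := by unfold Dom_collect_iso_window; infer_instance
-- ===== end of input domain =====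

-- B replaces A's single stateful pass by two independent early-exit searches
-- (forward for the first truthy iso, backward over the reversed list for the last);
-- objective: alternative decomposition, same cost.

-- truthiness of a Python value that is a str or None: None and "" are falsy
def pyTruthy (o : Option String) : Bool :=
  match o with
  | some s => !(s == "")
  | none => false

-- ===== PORT A =====
def collect_iso_window (events : List (List (String × String))) : Option String × Option String :=
  events.foldl
    (fun (st : Option String × Option String) event =>
      let iso := (PySem.Dict.mk event).get? "iso"
      if !pyTruthy iso then st                         -- if not iso: continue
      else
        let first := if pyTruthy st.1 then st.1 else iso   -- first = first or iso
        (first, iso))                                        -- last = iso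
    (none, none)

-- ===== PORT B =====
-- next((e.get("iso") for e in evs if e.get("iso")), None): early-exit linear search
def findIso : List (List (String × String)) → Option String
  | [] => none
  | e :: rest =>
    let iso := (PySem.Dict.mk e).get? "iso"
    if pyTruthy iso then iso else findIso rest

def collect_iso_window_alt (events : List (List (String × String))) : Option String × Option String :=
  (findIso events, findIso events.reverse)

-- ===== PRECONDITION & SPEC =====
def Spec_collect_iso_window (events : List (List (String × String))) (out : Option String × Option String) : Prop := out = collect_iso_window_alt events
instance (events : List (List (String × String))) (out : Option String × Option String) : Decidable (Spec_collect_iso_window events out) := by unfold Spec_collect_iso_window; infer_instance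

-- ===== CLAIM (what is proved, stated in full; the proofs are below) =====
def Claim_equal_collect_iso_window : Prop := ∀ (events : List (List (String × String))), Dom_collect_iso_window events → Spec_collect_iso_window events (collect_iso_window events)

-- ===== LEMMAS AND PROOFS =====

-- the truthy iso of one event, as an Option (none if absent or empty)
def pvG (e : List (String × String)) : Option String :=
  match (PySem.Dict.mk e).get? "iso" with
  | some s => if s == "" then none else some s
  | none => none

theorem pvG_truthy (e : List (String × String)) :
    pvG e = if pyTruthy ((PySem.Dict.mk e).get? "iso") then (PySem.Dict.mk e).get? "iso" else none := by
  unfold pvG pyTruthy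
  cases h : (PySem.Dict.mk e).get? "iso" with
  | none => simp
  | some s => by_cases hs : s = "" <;> simp [hs]

theorem findIso_eq_head (events : List (List (String × String))) :
    findIso events = (events.filterMap pvG).head? := by
  induction events with
  | nil => simp [findIso]
  | cons e es ih =>
    simp only [findIso, List.filterMap_cons]
    cases hg : pvG e with
    | none =>
      rw [pvG_truthy] at hg
      by_cases h : pyTruthy ((PySem.Dict.mk e).get? "iso") = true
      · exfalso
        cases hi : (PySem.Dict.mk e).get? "iso" with
        | none => simp [hi, pyTruthy] at h
        | some s =>
          rw [hi] at h hg
          rw [if_pos h] at hg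
          simp at hg
      · simp only [Bool.not_eq_true] at h
        simp [h, ih]
    | some s =>
      have hk : (PySem.Dict.mk e).get? "iso" = some s ∧ pyTruthy (some s) = true := by
        rw [pvG_truthy] at hg
        by_cases h : pyTruthy ((PySem.Dict.mk e).get? "iso") = true
        · simp only [if_pos h] at hg
          exact ⟨hg, by rw [← hg]; exact h⟩
        · simp [h] at hg
      simp [hk.1, hk.2]

def pvStep (st : Option String × Option String) (event : List (String × String)) :
    Option String × Option String :=
  let iso := (PySem.Dict.mk event).get? "iso"
  if !pyTruthy iso then st
  else
    let first := if pyTruthy st.1 then st.1 else iso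
    (first, iso)

theorem pvStep_g (st : Option String × Option String) (e : List (String × String)) :
    pvStep st e = match pvG e with
      | none => st
      | some s => ((if pyTruthy st.1 then st.1 else some s), some s) := by
  unfold pvStep pvG pyTruthy
  cases h : (PySem.Dict.mk e).get? "iso" with
  | none => simp
  | some s =>
    by_cases hs : s = ""
    · simp [hs]
    · simp [hs]

theorem pvFold_spec (events : List (List (String × String))) (f l : Option String) :
    events.foldl pvStep (f, l) =
      match events.filterMap pvG with
      | [] => (f, l)
      | s :: rest => ((if pyTruthy f then f else some s), (s :: rest).getLast?) := by
  induction events generalizing f l with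
  | nil => simp
  | cons e es ih =>
    simp only [List.foldl_cons, List.filterMap_cons, pvStep_g]
    cases hg : pvG e with
    | none => exact ih f l
    | some s =>
      have hts : pyTruthy (some s) = true := by
        unfold pvG at hg
        cases h : (PySem.Dict.mk e).get? "iso" with
        | none => simp [h] at hg
        | some t =>
          simp only [h] at hg
          by_cases ht : t = "" <;> simp [ht] at hg <;> simp [pyTruthy, ← hg, ht]
      rw [ih]
      cases hrest : es.filterMap pvG with
      | nil =>
        by_cases hf : pyTruthy f = true
        · simp [hf]
        · simp [hf]
      | cons s' rest' =>
        by_cases hf : pyTruthy f = true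
        · simp [hf, List.getLast?_cons_cons]
        · simp [hf, hts, List.getLast?_cons_cons]

-- ===== VERDICT (by name: the statement is the Claim_ definition above) =====
theorem collect_iso_window_spec : Claim_equal_collect_iso_window := by
  intro events _
  unfold Spec_collect_iso_window
  have hA : collect_iso_window events = events.foldl pvStep (none, none) := rfl
  have hB : collect_iso_window_alt events = (findIso events, findIso events.reverse) := rfl
  rw [hA, hB, pvFold_spec, findIso_eq_head, findIso_eq_head, List.filterMap_reverse,
    List.head?_reverse]
  cases h : events.filterMap pvG with
  | nil => rfl
  | cons s rest => simp [pyTruthy]
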